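-- pv_equiv track=rewrite | github.com/indweller/wiki-extractor | text-extractor.py | _remove_templates
-- ===== SOURCE A (Python) =====
-- def _remove_templates(text):
--     """Remove patterns like {{*}}"""
--     begin, removed = 0, ''
--     while begin < len(text):
--         pattern_begin = text.find('{{', begin)
--         if pattern_begin == -1:
--             if begin == 0:
--                 removed = text
--             else:
--                 removed += text[begin:]
--             break
--         if pattern_begin > begin:
--             removed += text[begin:pattern_begin]
--         pattern_end, depth = pattern_begin + 2, 2
--         while pattern_end < len(text):
--             ch = text[pattern_end]
--             pattern_end += 1
--             if ch == '{':
--                 depth += 1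
--             elif ch == '}':
--                 depth -= 1
--                 if depth == 0:
--                     link = text[pattern_begin + 2:pattern_end - 2]
--                     parts = link.split('|')
--                     template_type = parts[0].split(' ')[0].lower()
--                     if len(parts) == 1:
--                         if all(map(lambda x: x in {'"', "'", ' '}, parts[0][:])):
--                             removed += parts[0].replace(' ', '')
--                     elif len(parts) in [2, 3]:
--                         if template_type in {'le'} or template_type.startswith('link-'):
--                             removed += parts[1]
--                     break
--         begin = pattern_end
--     return removed
-- ===== SOURCE B (Python) =====
-- def _tokenize(text):
--     """One pass: split text into ('lit', s) and ('tpl', body) segments.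
--     A template starts at two consecutive open braces (depth 2), each brace
--     adjusts the depth, and it closes when the depth reaches 0; its body is
--     everything in between minus the final two characters. An unclosed
--     template is dropped."""
--     segs = []
--     lit = []
--     i, n = 0, len(text)
--     while i < n:
--         if text[i] == '{' and i + 1 < n and text[i + 1] == '{':
--             segs.append(('lit', ''.join(lit)))
--             lit = []
--             body, i = _scan_template(text, i + 2)
--             if body is None:
--                 return segs
--             segs.append(('tpl', body))
--         else:
--             lit.append(text[i])
--             i += 1
--     segs.append(('lit', ''.join(lit)))
--     return segs
--
--
-- def _scan_template(text, i):
--     depth = 2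
--     buf = []
--     n = len(text)
--     while i < n:
--         c = text[i]
--         i += 1
--         buf.append(c)
--         if c == '{':
--             depth += 1
--         elif c == '}':
--             depth -= 1
--             if depth == 0:
--                 return ''.join(buf[:-2]), i
--     return None, n
--
--
-- def _transform(link):
--     """The transformation applied to one template body (rules unchanged)."""
--     parts = link.split('|')
--     template_type = parts[0].split(' ')[0].lower()
--     if len(parts) == 1:
--         if all(ch in {'"', "'", ' '} for ch in parts[0]):
--             return parts[0].replace(' ', '')
--         return ''
--     if len(parts) in [2, 3] and (template_type in {'le'} or template_type.startswith('link-')):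
--         return parts[1]
--     return ''
--
--
-- def _remove_templates(text):
--     return ''.join(s if kind == 'lit' else _transform(s)
--                    for kind, s in _tokenize(text))
-- ===== Notes on version B (the rewrite author's own statement) =====
-- stated objective: alternative
-- what changed: A's find-the-opening-braces outer loop with index arithmetic and in-loop slicing is replaced by a two-phase design: one character-level tokenise pass that splits the text into literal and template-body segments, then a transform-and-join pass over the segments.
import Mathlib
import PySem

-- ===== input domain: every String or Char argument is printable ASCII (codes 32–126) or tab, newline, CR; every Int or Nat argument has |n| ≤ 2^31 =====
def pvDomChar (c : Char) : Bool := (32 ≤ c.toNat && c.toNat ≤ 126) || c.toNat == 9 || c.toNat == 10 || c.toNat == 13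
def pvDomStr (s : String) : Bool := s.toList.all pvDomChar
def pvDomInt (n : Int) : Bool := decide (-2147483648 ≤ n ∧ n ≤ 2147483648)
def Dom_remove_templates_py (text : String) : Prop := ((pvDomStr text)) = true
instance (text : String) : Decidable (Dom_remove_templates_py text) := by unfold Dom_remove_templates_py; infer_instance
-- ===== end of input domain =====

-- B replaces A's find-plus-index-arithmetic loop by a tokenise pass (literal/template segments) followed by a transform-and-join pass; same transform rules, same return value.

-- ===== PORT A =====

-- A's inner 'while pattern_end < len(text)' loop: walks indices tracking the brace
-- depth; returns the final pattern_end and whether depth reached 0 (the 'break'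
-- that computes the link is hoisted to the caller, which is where A appends it).
-- 'fuel' is only a structural-recursion totality guard (callers pass enough).
def pvInnerA (cs : List Char) (fuel : Nat) (pe : Nat) (depth : Int) : Nat × Bool :=
  match fuel with
  | 0 => (pe, false)
  | fuel + 1 =>
    if h : pe < cs.length then
      let ch := cs[pe]
      if ch = '{' then pvInnerA cs fuel (pe + 1) (depth + 1)
      else if ch = '}' then
        if depth - 1 = 0 then (pe + 1, true) else pvInnerA cs fuel (pe + 1) (depth - 1)
      else pvInnerA cs fuel (pe + 1) depth
    else (pe, false)

-- the code A runs when depth hits 0 (split / template_type / append rules, inline in A)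
def pvTransformA (link : List Char) : List Char :=
  let parts := PySem.Chars.splitOn link ['|']
  let template_type :=
    PySem.Chars.lower ((PySem.Chars.splitOn (parts.headD []) [' ']).headD [])
  if parts.length = 1 then
    -- all(map(lambda x: x in {'"', "'", ' '}, parts[0][:]))
    if (PySem.List.slice (parts.headD []) none none).all
        (fun x => x == '"' || x == '\'' || x == ' ') then
      PySem.Chars.replace (parts.headD []) [' '] []
    else []
  else if parts.length = 2 ∨ parts.length = 3 then
    if template_type = ['l', 'e'] ∨
        PySem.Chars.startswith template_type ['l', 'i', 'n', 'k', '-'] = true then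
      parts.getD 1 []  -- parts[1]; parts.length ≥ 2 in this branch
    else []
  else []

-- A's outer 'while begin < len(text)' loop over (begin, removed); fuel as above
def pvOuterA (cs : List Char) (fuel : Nat) (begin_ : Nat) (removed : List Char) : List Char :=
  match fuel with
  | 0 => removed
  | fuel + 1 =>
    if hb : begin_ < cs.length then
      let pb := PySem.Chars.findFrom cs ['{', '{'] (begin_ : Int) none
      if pb = -1 then
        if begin_ = 0 then cs else removed ++ PySem.Chars.slice cs (some (begin_ : Int)) none
      else
        let removed₁ :=
          if (begin_ : Int) < pb then removed ++ PySem.Chars.slice cs (some (begin_ : Int)) (some pb)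
          else removed
        let r := pvInnerA cs cs.length (pb.toNat + 2) 2
        let removed₂ :=
          if r.2 then
            removed₁ ++ pvTransformA (PySem.Chars.slice cs (some (pb + 2)) (some ((r.1 : Int) - 2)))
          else removed₁
        pvOuterA cs fuel r.1 removed₂
    else removed

def remove_templates_py (text : String) : String :=
  String.ofList (pvOuterA text.toList (text.toList.length + 1) 0 [])

-- ===== PORT B =====

inductive PvSeg
  | lit : List Char → PvSeg
  | tpl : List Char → PvSeg
deriving DecidableEq, Repr

-- _scan_template: consume chars after the opening braces tracking depth; on close return (body, rest)
def pvScanTpl : List Char → Int → List Char → Option (List Char × List Char)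
  | [], _, _ => none
  | c :: rest, depth, buf =>
    let buf' := buf ++ [c]
    if c = '{' then pvScanTpl rest (depth + 1) buf'
    else if c = '}' then
      if depth - 1 = 0 then some (PySem.List.slice buf' none (some (-2)), rest)
      else pvScanTpl rest (depth - 1) buf'
    else pvScanTpl rest depth buf'

-- _tokenize: one pass over the characters, literal accumulator 'lit'
-- ('fuel' is only a structural-recursion totality guard; callers pass enough)
def pvTokenize (fuel : Nat) (s lit : List Char) : List PvSeg :=
  match fuel, s with
  | 0, _ => []
  | fuel + 1, '{' :: '{' :: rest =>
      match pvScanTpl rest 2 [] with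
      | none => [PvSeg.lit lit]
      | some (body, rest') => PvSeg.lit lit :: PvSeg.tpl body :: pvTokenize fuel rest' []
  | fuel + 1, c :: rest => pvTokenize fuel rest (lit ++ [c])
  | _ + 1, [] => [PvSeg.lit lit]

-- _transform (rules unchanged from A, early-return form)
def pvTransformB (link : List Char) : List Char :=
  let parts := PySem.Chars.splitOn link ['|']
  let p0 := parts.headD []
  let template_type := PySem.Chars.lower ((PySem.Chars.splitOn p0 [' ']).headD [])
  if parts.length = 1 then
    if p0.all (fun ch => ch == '"' || ch == '\'' || ch == ' ') then
      PySem.Chars.replace p0 [' '] []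
    else []
  else if (parts.length = 2 ∨ parts.length = 3) ∧
      (template_type = ['l', 'e'] ∨
        PySem.Chars.startswith template_type ['l', 'i', 'n', 'k', '-'] = true) then
    parts.getD 1 []
  else []

-- ''.join over the segments
def pvRender : List PvSeg → List Char
  | [] => []
  | PvSeg.lit s :: r => s ++ pvRender r
  | PvSeg.tpl s :: r => pvTransformB s ++ pvRender r

def remove_templates_py_alt (text : String) : String :=
  String.ofList (pvRender (pvTokenize (text.toList.length + 1) text.toList []))

-- ===== PRECONDITION & SPEC =====
def Spec_remove_templates_py (text : String) (out : String) : Prop := out = remove_templates_py_alt text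
instance (text : String) (out : String) : Decidable (Spec_remove_templates_py text out) := by unfold Spec_remove_templates_py; infer_instance

-- ===== CLAIM (what is proved, stated in full; the proofs are below) =====
def Claim_equal_remove_templates_py : Prop := ∀ (text : String), Dom_remove_templates_py text → Spec_remove_templates_py text (remove_templates_py text)

-- ===== LEMMAS AND PROOFS =====

theorem pvTok_nil (fuel : Nat) (lit : List Char) :
    pvTokenize (fuel + 1) [] lit = [PvSeg.lit lit] := rfl

theorem pvTok_open (fuel : Nat) (rest lit : List Char) :
    pvTokenize (fuel + 1) ('{' :: '{' :: rest) lit =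
      match pvScanTpl rest 2 [] with
      | none => [PvSeg.lit lit]
      | some (body, rest') => PvSeg.lit lit :: PvSeg.tpl body :: pvTokenize fuel rest' [] := rfl

theorem pvTok_lit (fuel : Nat) (c : Char) (rest lit : List Char)
    (h : ¬ (['{', '{'] <+: c :: rest)) :
    pvTokenize (fuel + 1) (c :: rest) lit = pvTokenize fuel rest (lit ++ [c]) := by
  rw [pvTokenize.eq_def]
  split
  · rename_i heq; simp at heq
  · rename_i h1 h2
    exact absurd (show ['{', '{'] <+: c :: rest by rw [h2]; exact ⟨_, rfl⟩) h
  · rename_i h1 h2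
    injection h2 with hc hr
    subst hc; subst hr
    congr 1
    omega
  · rename_i heq; simp at heq

theorem pvTok_no_open (s : List Char) : ∀ fuel lit, s.length < fuel → ¬ (['{', '{'] <:+: s) →
    pvTokenize fuel s lit = [PvSeg.lit (lit ++ s)] := by
  induction s with
  | nil =>
      intro fuel lit hf h
      obtain ⟨f, rfl⟩ : ∃ f, fuel = f + 1 := ⟨fuel - 1, by omega⟩
      simp [pvTok_nil]
  | cons c rest ih =>
      intro fuel lit hf h
      obtain ⟨f, rfl⟩ : ∃ f, fuel = f + 1 := ⟨fuel - 1, by omega⟩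
      rw [pvTok_lit f c rest lit (fun hp => h hp.isInfix)]
      rw [ih f (lit ++ [c]) (by simpa using hf) (fun hi => h (List.infix_cons hi))]
      simp

theorem pvTok_walk (pre : List Char) : ∀ (fuel : Nat) (after lit : List Char),
    (∀ t, t < pre.length → ¬ (['{', '{'] <+: (pre.drop t ++ after))) →
    pvTokenize (fuel + pre.length) (pre ++ after) lit = pvTokenize fuel after (lit ++ pre) := by
  induction pre with
  | nil => intro fuel after lit h; simp
  | cons c pre' ih =>
      intro fuel after lit h
      have h0 := h 0 (by simp)
      simp only [List.drop_zero] at h0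
      have hfe : fuel + (c :: pre').length = (fuel + pre'.length) + 1 := by
        simp [List.length_cons]; omega
      rw [hfe, List.cons_append, pvTok_lit (fuel + pre'.length) c (pre' ++ after) lit h0]
      rw [ih fuel after (lit ++ [c]) (fun t ht => by simpa using h (t + 1) (by simpa using ht))]
      simp

theorem pvScan_inner (cs : List Char) : ∀ n j d buf f, cs.length - j = n → j ≤ cs.length →
    cs.length - j ≤ f →
    (pvScanTpl (cs.drop j) d buf = none → pvInnerA cs f j d = (cs.length, false)) ∧
    (∀ body rest, pvScanTpl (cs.drop j) d buf = some (body, rest) →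
       ∃ pe, j < pe ∧ pe ≤ cs.length ∧ pvInnerA cs f j d = (pe, true) ∧ rest = cs.drop pe ∧
         body = PySem.List.slice (buf ++ (cs.drop j).take (pe - j)) none (some (-2))) := by
  intro n
  induction n with
  | zero =>
      intro j d buf f hn hj hf
      have hjl : j = cs.length := by omega
      subst hjl
      constructor
      · intro _
        match f with
        | 0 => rfl
        | f + 1 => rw [pvInnerA]; simp
      · intro body rest h; rw [List.drop_length] at h; simp [pvScanTpl] at h
  | succ n ih =>
      intro j d buf f hn hj hf
      have hjlt : j < cs.length := by omega
      obtain ⟨f', rfl⟩ : ∃ f', f = f' + 1 := ⟨f - 1, by omega⟩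
      have hdrop : cs.drop j = cs[j] :: cs.drop (j + 1) := List.drop_eq_getElem_cons hjlt
      have hInner : pvInnerA cs (f' + 1) j d =
          (if cs[j] = '{' then pvInnerA cs f' (j + 1) (d + 1)
           else if cs[j] = '}' then
             if d - 1 = 0 then (j + 1, true) else pvInnerA cs f' (j + 1) (d - 1)
           else pvInnerA cs f' (j + 1) d) := by
        rw [pvInnerA]; simp [hjlt]
      have hScan : pvScanTpl (cs.drop j) d buf =
          (if cs[j] = '{' then pvScanTpl (cs.drop (j + 1)) (d + 1) (buf ++ [cs[j]])
           else if cs[j] = '}' then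
             if d - 1 = 0 then some (PySem.List.slice (buf ++ [cs[j]]) none (some (-2)), cs.drop (j + 1))
             else pvScanTpl (cs.drop (j + 1)) (d - 1) (buf ++ [cs[j]])
           else pvScanTpl (cs.drop (j + 1)) d (buf ++ [cs[j]])) := by
        rw [hdrop]; rfl
      have htake : ∀ pe, j + 1 < pe →
          buf ++ [cs[j]] ++ (cs.drop (j + 1)).take (pe - (j + 1)) = buf ++ (cs.drop j).take (pe - j) := by
        intro pe hpe
        rw [hdrop]
        have : pe - j = (pe - (j + 1)) + 1 := by omega
        rw [this, List.take_succ_cons, List.append_assoc]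
        rfl
      by_cases h1 : cs[j] = '{'
      · rw [hInner, if_pos h1, hScan, if_pos h1]
        obtain ⟨iha, ihb⟩ := ih (j + 1) (d + 1) (buf ++ [cs[j]]) f' (by omega) (by omega) (by omega)
        refine ⟨iha, ?_⟩
        intro body rest h
        obtain ⟨pe, hpe1, hpe2, hpe3, hpe4, hpe5⟩ := ihb body rest h
        exact ⟨pe, by omega, hpe2, hpe3, hpe4, by rw [hpe5, htake pe hpe1]⟩
      · by_cases h2 : cs[j] = '}'
        · by_cases h3 : d - 1 = 0
          · rw [hInner, if_neg h1, if_pos h2, if_pos h3, hScan, if_neg h1, if_pos h2, if_pos h3]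
            constructor
            · intro h; simp at h
            · intro body rest h
              simp only [Option.some.injEq, Prod.mk.injEq] at h
              refine ⟨j + 1, by omega, by omega, rfl, h.2.symm, ?_⟩
              rw [← h.1]
              have h1take : List.take (j + 1 - j) (List.drop j cs) = [cs[j]] := by
                rw [show j + 1 - j = 1 from by omega, hdrop,
                  show (1 : Nat) = 0 + 1 from rfl, List.take_succ_cons, List.take_zero]
              rw [h1take]
          · rw [hInner, if_neg h1, if_pos h2, if_neg h3, hScan, if_neg h1, if_pos h2, if_neg h3]
            obtain ⟨iha, ihb⟩ := ih (j + 1) (d - 1) (buf ++ [cs[j]]) f' (by omega) (by omega) (by omega)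
            refine ⟨iha, ?_⟩
            intro body rest h
            obtain ⟨pe, hpe1, hpe2, hpe3, hpe4, hpe5⟩ := ihb body rest h
            exact ⟨pe, by omega, hpe2, hpe3, hpe4, by rw [hpe5, htake pe hpe1]⟩
        · rw [hInner, if_neg h1, if_neg h2, hScan, if_neg h1, if_neg h2]
          obtain ⟨iha, ihb⟩ := ih (j + 1) d (buf ++ [cs[j]]) f' (by omega) (by omega) (by omega)
          refine ⟨iha, ?_⟩
          intro body rest h
          obtain ⟨pe, hpe1, hpe2, hpe3, hpe4, hpe5⟩ := ihb body rest h
          exact ⟨pe, by omega, hpe2, hpe3, hpe4, by rw [hpe5, htake pe hpe1]⟩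

theorem pv_transform_eq (link : List Char) : pvTransformA link = pvTransformB link := by
  simp only [pvTransformA, pvTransformB, PySem.List.slice_none_none]
  split_ifs <;> first | rfl | tauto

theorem pv_main (cs : List Char) : ∀ n b removed fa fb, cs.length - b = n → b ≤ cs.length →
    (b = 0 → removed = []) → n < fa → n < fb →
    pvOuterA cs fa b removed = removed ++ pvRender (pvTokenize fb (cs.drop b) []) := by
  intro n
  induction n using Nat.strong_induction_on with
  | _ n ih =>
  intro b removed fa fb hn hble h0 hfa hfb
  obtain ⟨fa', rfl⟩ : ∃ x, fa = x + 1 := ⟨fa - 1, by omega⟩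
  obtain ⟨fb', rfl⟩ : ∃ x, fb = x + 1 := ⟨fb - 1, by omega⟩
  by_cases hblt : b < cs.length
  · rw [pvOuterA]
    simp only [dif_pos hblt]
    by_cases hF : PySem.Chars.findFrom cs ['{', '{'] (b : Int) none = -1
    · rw [if_pos hF]
      have hni : ¬ (['{', '{'] <:+: cs.drop b) :=
        (PySem.Chars.findFrom_natCast_eq_neg_one_iff cs ['{', '{'] b hble).mp hF
      rw [pvTok_no_open _ _ _ (by rw [List.length_drop]; omega) hni]
      simp only [pvRender, List.nil_append, List.append_nil]
      by_cases hb0 : b = 0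
      · subst hb0; rw [if_pos rfl, h0 rfl]; simp
      · rw [if_neg hb0, PySem.Chars.slice_eq_listSlice, PySem.List.slice_from_natCast]
    · rw [if_neg hF]
      obtain ⟨hbF, hpre, hmin⟩ := PySem.Chars.findFrom_natCast_spec cs ['{', '{'] b hble hF
      set F := PySem.Chars.findFrom cs ['{', '{'] (b : Int) none with hFdef
      set p := F.toNat with hp
      have hFp : F = (p : Int) := by rw [hp]; exact (Int.toNat_of_nonneg (by omega)).symm
      have hbp : b ≤ p := by omega
      have hdecomp : cs.drop p = '{' :: '{' :: (cs.drop (p + 2)) := by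
        obtain ⟨t, ht⟩ := hpre
        have h2 : t = cs.drop (p + 2) := by
          have := congrArg (List.drop 2) ht
          simpa [List.drop_drop] using this
        rw [← ht, h2]; rfl
      have hp2 : p + 2 ≤ cs.length := by
        have := congrArg List.length hdecomp
        simp at this; omega
      set pre := (cs.drop b).take (p - b) with hpredef
      have hsplit : cs.drop b = pre ++ cs.drop p := by
        conv_lhs => rw [← List.take_append_drop (p - b) (cs.drop b)]
        rw [List.drop_drop, show b + (p - b) = p from by omega]
      have hlenpre : pre.length = p - b := by
        rw [hpredef, List.length_take, List.length_drop]; omega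
      have hwalkhyp : ∀ t, t < pre.length → ¬ (['{', '{'] <+: (pre.drop t ++ cs.drop p)) := by
        intro t ht
        have he : pre.drop t ++ cs.drop p = cs.drop (b + t) := by
          rw [← List.drop_append_of_le_length (by omega), ← hsplit, List.drop_drop]
        rw [he]
        exact hmin (b + t) (by omega) (by omega)
      obtain ⟨fc, hfc⟩ : ∃ x, fb' + 1 = (x + 1) + pre.length := ⟨fb' - pre.length, by omega⟩
      have hwalk : pvTokenize (fb' + 1) (cs.drop b) [] = pvTokenize (fc + 1) (cs.drop p) pre := by
        conv_lhs => rw [hsplit, hfc]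
        rw [pvTok_walk pre (fc + 1) (cs.drop p) [] hwalkhyp, List.nil_append]
      have hrem1 : (if (b : Int) < F then removed ++ PySem.Chars.slice cs (some (b : Int)) (some F) else removed)
          = removed ++ pre := by
        by_cases hlt : (b : Int) < F
        · rw [if_pos hlt, hFp, PySem.Chars.slice_eq_listSlice, PySem.List.slice_natCast]
        · have hpb : p = b := by omega
          rw [if_neg hlt, hpredef, hpb]
          simp
      obtain ⟨inone, isome⟩ := pvScan_inner cs (cs.length - (p + 2)) (p + 2) 2 [] cs.length rfl hp2 (by omega)
      cases hscan : pvScanTpl (cs.drop (p + 2)) 2 [] with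
      | none =>
          have hr : pvInnerA cs cs.length (p + 2) 2 = (cs.length, false) := inone hscan
          rw [hrem1, hr]
          simp only [Bool.false_eq_true, if_false]
          rw [ih 0 (by omega) cs.length (removed ++ pre) fa' (fb' + 1) (by omega) le_rfl (by omega)
            (by omega) (by omega)]
          rw [List.drop_length, pvTok_nil]
          rw [hwalk, hdecomp, pvTok_open, hscan]
          simp [pvRender]
      | some br =>
          obtain ⟨body, rest⟩ := br
          obtain ⟨pe, hpe1, hpe2, hr, hrest, hbody⟩ := isome body rest hscan
          rw [hrem1, hr]
          simp only [if_true]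
          have hlink : PySem.Chars.slice cs (some (F + 2)) (some ((pe : Int) - 2)) = body := by
            rw [hFp, hbody, PySem.Chars.slice_eq_listSlice]
            have e1 : (p : Int) + 2 = ((p + 2 : Nat) : Int) := by push_cast; ring
            have e2 : (pe : Int) - 2 = ((pe - 2 : Nat) : Int) := by omega
            rw [e1, e2, PySem.List.slice_natCast, List.nil_append,
              PySem.List.slice_to_neg_ofNat _ 2 (by omega), List.length_take,
              List.length_drop, List.take_take]
            congr 1
            omega
          rw [hlink, pv_transform_eq]
          rw [ih (cs.length - pe) (by omega) pe (removed ++ pre ++ pvTransformB body) fa' fc rfl hpe2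
            (by omega) (by omega) (by omega)]
          rw [hwalk, hdecomp, pvTok_open, hscan, ← hrest]
          simp [pvRender, List.append_assoc]
  · have hbl : b = cs.length := by omega
    subst hbl
    rw [pvOuterA]
    simp only [dif_neg (lt_irrefl _)]
    rw [List.drop_length, pvTok_nil]
    simp [pvRender]

-- ===== VERDICT (by name: the statement is the Claim_ definition above) =====
theorem remove_templates_py_spec : Claim_equal_remove_templates_py := by
  intro text _dom
  unfold Spec_remove_templates_py remove_templates_py remove_templates_py_alt
  have h := pv_main text.toList text.toList.length 0 [] (text.toList.length + 1)
    (text.toList.length + 1) (by omega) (by omega) (fun _ => rfl) (by omega) (by omega)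
  simp only [List.drop_zero, List.nil_append] at h
  rw [h]
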